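-- pv_equiv track=rewrite | github.com/cldborges/telegram-forwarder_auto | funcoes.py | calcular_maior_sequencia
-- ===== SOURCE A (Python) =====
-- def calcular_maior_sequencia(resultados, categoria):
--     maior_sequencia_aparecendo = 0  # Inicializa a variável para armazenar a maior sequência
--     sequencia_atual_aparecendo = 0  # Inicializa a variável para armazenar a sequência atual
--     maior_sequencia_ausente = 0  # Inicializa a variável para armazenar a maior sequência
--     sequencia_atual_ausente = 0  # Inicializa a variável para armazenar a sequência atual
--     for resultado in resultados:
--         if resultado in categoria:
--             sequencia_atual_aparecendo += 1
--             sequencia_atual_ausente = 0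
--             if sequencia_atual_aparecendo > maior_sequencia_aparecendo:
--                 maior_sequencia_aparecendo = sequencia_atual_aparecendo
--         else:
--             sequencia_atual_ausente += 1
--             sequencia_atual_aparecendo = 0
--             if sequencia_atual_ausente > maior_sequencia_ausente:
--                 maior_sequencia_ausente = sequencia_atual_ausente
--     return maior_sequencia_aparecendo, maior_sequencia_ausente
-- ===== SOURCE B (Python) =====
-- def calcular_maior_sequencia(resultados, categoria):
--     # run-length encode the presence sequence, then reduce over the runs
--     present = [r in categoria for r in resultados]
--     runs = []
--     i = 0
--     while i < len(present):
--         j = i + 1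
--         while j < len(present) and present[j] == present[i]:
--             j += 1
--         runs.append((present[i], j - i))
--         i = j
--     return (max((n for k, n in runs if k), default=0),
--             max((n for k, n in runs if not k), default=0))
-- ===== Notes on version B (the rewrite author's own statement) =====
-- stated objective: alternative
-- what changed: B materialises the run-length encoding of the boolean presence sequence and reduces over the runs, instead of A's single pass maintaining four running counters.
import Mathlib
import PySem

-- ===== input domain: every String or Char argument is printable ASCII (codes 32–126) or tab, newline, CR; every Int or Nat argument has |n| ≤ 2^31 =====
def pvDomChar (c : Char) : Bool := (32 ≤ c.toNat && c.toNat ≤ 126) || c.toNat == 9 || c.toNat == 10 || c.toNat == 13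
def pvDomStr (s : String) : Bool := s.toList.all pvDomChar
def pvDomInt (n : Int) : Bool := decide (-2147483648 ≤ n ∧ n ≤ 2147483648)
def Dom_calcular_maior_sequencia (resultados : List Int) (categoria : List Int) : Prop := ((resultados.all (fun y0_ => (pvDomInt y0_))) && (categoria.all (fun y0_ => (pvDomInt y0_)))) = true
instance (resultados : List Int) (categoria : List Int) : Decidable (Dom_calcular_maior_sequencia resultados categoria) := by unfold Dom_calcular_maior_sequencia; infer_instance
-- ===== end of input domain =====

-- B changes the decomposition: it builds the run-length encoding of the presence
-- sequence and reduces over the runs, instead of A's four running counters (objective: alternative).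

-- ===== PORT A =====
def calcular_maior_sequencia (resultados : List Int) (categoria : List Int) : Int × Int :=
  let s := resultados.foldl (fun (st : Int × Int × Int × Int) resultado =>
    let (msa, sca, msu, scu) := st
    if categoria.contains resultado then
      let sca := sca + 1
      let scu := (0 : Int)
      let msa := if sca > msa then sca else msa
      (msa, sca, msu, scu)
    else
      let scu := scu + 1
      let sca := (0 : Int)
      let msu := if scu > msu then scu else msu
      (msa, sca, msu, scu)) (0, 0, 0, 0)
  (s.1, s.2.2.1)

-- ===== PORT B =====
-- run-length encoding of a boolean list (the two nested while loops of Source B: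
-- the inner while that advances j over equal elements is takeWhile/dropWhile)
def pvRuns : List Bool → List (Bool × Int)
  | [] => []
  | b :: rest =>
    (b, 1 + ((rest.takeWhile (· == b)).length : Int)) :: pvRuns (rest.dropWhile (· == b))
  termination_by l => l.length
  decreasing_by exact Nat.lt_succ_of_le (List.length_dropWhile_le _ _)

-- max(gen, default=0) over positive run lengths = foldl max 0
def calcular_maior_sequencia_alt (resultados : List Int) (categoria : List Int) : Int × Int :=
  let present := resultados.map (fun r => categoria.contains r)
  let runs := pvRuns present
  ((runs.filter (fun p => p.1 == true)).foldl (fun m p => max m p.2) 0,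
   (runs.filter (fun p => p.1 == false)).foldl (fun m p => max m p.2) 0)

-- ===== PRECONDITION & SPEC =====
def Spec_calcular_maior_sequencia (resultados : List Int) (categoria : List Int) (out : Int × Int) : Prop := out = calcular_maior_sequencia_alt resultados categoria
instance (resultados : List Int) (categoria : List Int) (out : Int × Int) : Decidable (Spec_calcular_maior_sequencia resultados categoria out) := by unfold Spec_calcular_maior_sequencia; infer_instance

-- ===== CLAIM (what is proved, stated in full; the proofs are below) =====
def Claim_equal_calcular_maior_sequencia : Prop := ∀ (resultados : List Int) (categoria : List Int), Dom_calcular_maior_sequencia resultados categoria → Spec_calcular_maior_sequencia resultados categoria (calcular_maior_sequencia resultados categoria)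

-- ===== LEMMAS AND PROOFS =====

-- A's loop body, as a function of the presence boolean
def pvStep (st : Int × Int × Int × Int) (b : Bool) : Int × Int × Int × Int :=
  let (msa, sca, msu, scu) := st
  if b then
    let sca := sca + 1
    let scu := (0 : Int)
    let msa := if sca > msa then sca else msa
    (msa, sca, msu, scu)
  else
    let scu := scu + 1
    let sca := (0 : Int)
    let msu := if scu > msu then scu else msu
    (msa, sca, msu, scu)

-- longest k-run visible when a current k-run of length c is in progress
def pvH (k : Bool) (c : Int) : List Bool → Int
  | [] => c
  | b :: bs => if b = k then pvH k (c + 1) bs else max c (pvH k 0 bs)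

theorem pvH_cons_eq (k : Bool) (c : Int) (b : Bool) (bs : List Bool) :
    pvH k c (b :: bs) = if b = k then pvH k (c + 1) bs else max c (pvH k 0 bs) := rfl

def pvMaxKey (k : Bool) (runs : List (Bool × Int)) : Int :=
  (runs.filter (fun p => p.1 == k)).foldl (fun m p => max m p.2) 0

theorem pvH_ge (k : Bool) (bs : List Bool) : ∀ c : Int, c ≤ pvH k c bs := by
  induction bs with
  | nil => intro c; simp [pvH]
  | cons b bs ih =>
    intro c
    simp only [pvH]
    split
    · exact le_trans (by omega) (ih (c + 1))
    · exact le_max_left _ _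

theorem pvH_neq_head (k : Bool) (c : Int) (hc : 0 ≤ c) (d : List Bool)
    (hd : d = [] ∨ ∃ y d', d = y :: d' ∧ y ≠ k) :
    pvH k c d = max c (pvH k 0 d) := by
  rcases hd with h | ⟨y, d', rfl, hy⟩
  · subst h; simp only [pvH]; omega
  · simp only [pvH, if_neg hy]
    have h0 : (0 : Int) ≤ pvH k 0 d' := pvH_ge k d' 0
    omega

theorem pvH_append_run (k : Bool) (d : List Bool) :
    ∀ (t : List Bool), (∀ x ∈ t, x = k) → ∀ c : Int, pvH k c (t ++ d) = pvH k (c + t.length) d := by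
  intro t
  induction t with
  | nil => intro _ c; simp
  | cons x t ih =>
    intro hall c
    have hx : x = k := hall x (by simp)
    simp only [List.cons_append, pvH, if_pos hx]
    rw [ih (fun y hy => hall y (by simp [hy])) (c + 1)]
    congr 1
    push_cast [List.length_cons]
    ring

theorem pvH_skip (k : Bool) (d : List Bool) :
    ∀ (t : List Bool), t ≠ [] → (∀ x ∈ t, x ≠ k) → ∀ c : Int, 0 ≤ c →
      pvH k c (t ++ d) = max c (pvH k 0 d) := by
  intro t
  induction t with
  | nil => intro h; exact absurd rfl h
  | cons x t ih =>
    intro _ hall c hc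
    have hx : x ≠ k := hall x (by simp)
    simp only [List.cons_append, pvH, if_neg hx]
    have h0 : (0 : Int) ≤ pvH k 0 d := pvH_ge k d 0
    by_cases ht : t = []
    · subst ht
      simp only [List.nil_append]
    · rw [ih ht (fun y hy => hall y (by simp [hy])) 0 le_rfl]
      omega

theorem pvFoldl_max_nonneg (l : List (Bool × Int)) : ∀ a : Int, 0 ≤ a →
    0 ≤ l.foldl (fun m p => max m p.2) a := by
  induction l with
  | nil => intro a ha; simpa using ha
  | cons p l ih => intro a ha; exact ih _ (le_trans ha (le_max_left _ _))

theorem pvFoldl_max_shift (l : List (Bool × Int)) : ∀ a : Int, 0 ≤ a →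
    l.foldl (fun m p => max m p.2) a = max a (l.foldl (fun m p => max m p.2) 0) := by
  induction l with
  | nil => intro a ha; simp only [List.foldl]; omega
  | cons p l ih =>
    intro a ha
    simp only [List.foldl]
    rw [ih (max a p.2) (le_trans ha (le_max_left _ _)), ih (max 0 p.2) (le_max_left _ _)]
    have := pvFoldl_max_nonneg l 0 le_rfl
    omega

theorem pvDropWhile_head (p : Bool → Bool) : ∀ (l : List Bool) (y : Bool) (d' : List Bool),
    l.dropWhile p = y :: d' → p y = false := by
  intro l
  induction l with
  | nil => intro y d' h; simp [List.dropWhile] at h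
  | cons x l ih =>
    intro y d' h
    by_cases hx : p x = true
    · rw [List.dropWhile_cons_of_pos hx] at h
      exact ih y d' h
    · rw [List.dropWhile_cons_of_neg hx] at h
      cases h
      simpa using hx

theorem pvH_eq_maxKey (k : Bool) : ∀ (bs : List Bool), pvH k 0 bs = pvMaxKey k (pvRuns bs) := by
  intro bs
  induction hn : bs.length using Nat.strong_induction_on generalizing bs with
  | _ n ih =>
  match bs with
  | [] => simp [pvH, pvRuns, pvMaxKey]
  | b :: rest =>
    have hsplit : rest = rest.takeWhile (· == b) ++ rest.dropWhile (· == b) :=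
      (List.takeWhile_append_dropWhile (p := (· == b)) (l := rest)).symm
    set t := rest.takeWhile (· == b) with ht
    set d := rest.dropWhile (· == b) with hdd
    have hall : ∀ x ∈ t, x = b := by
      intro x hx
      have h2 := List.mem_takeWhile_imp hx
      simpa using h2
    have hdlen : d.length < n := by
      subst hn
      simp only [List.length_cons]
      exact Nat.lt_succ_of_le (List.length_dropWhile_le _ _)
    have ihd : pvH k 0 d = pvMaxKey k (pvRuns d) := ih d.length hdlen d rfl
    have hdhead : d = [] ∨ ∃ y d', d = y :: d' ∧ y ≠ b := by
      match hd : d with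
      | [] => exact Or.inl rfl
      | y :: d' =>
        refine Or.inr ⟨y, d', rfl, ?_⟩
        have := pvDropWhile_head (· == b) rest y d' hdd.symm
        simpa using this
    have hruns : pvRuns (b :: rest) = (b, 1 + (t.length : Int)) :: pvRuns d := by
      simp only [pvRuns]
      rw [← ht, ← hdd]
    by_cases hbk : b = k
    · subst hbk
      have h1 : pvH b 0 (b :: rest) = pvH b (1 + t.length) d := by
        conv_lhs => rw [show b :: rest = b :: (t ++ d) by rw [← hsplit]]
        rw [pvH_cons_eq, if_pos rfl, pvH_append_run b d t hall]
        norm_num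
      have h2 : pvH b (1 + t.length) d = max (1 + (t.length : Int)) (pvH b 0 d) := by
        apply pvH_neq_head b _ (by positivity) d
        rcases hdhead with h | ⟨y, d', hy, hyk⟩
        · exact Or.inl h
        · exact Or.inr ⟨y, d', hy, hyk⟩
      have h3 : pvMaxKey b (pvRuns (b :: rest)) = max (1 + (t.length : Int)) (pvMaxKey b (pvRuns d)) := by
        rw [hruns]
        simp only [pvMaxKey, List.filter_cons, beq_self_eq_true, if_true, List.foldl_cons]
        rw [pvFoldl_max_shift _ (max 0 (1 + (t.length : Int))) (le_max_left _ _)]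
        rw [max_eq_right (by positivity : (0 : Int) ≤ 1 + (t.length : Int))]
      rw [h1, h2, h3, ihd]
    · have hne : ∀ x ∈ b :: t, x ≠ k := by
        intro x hx
        rcases List.mem_cons.mp hx with rfl | hx
        · exact hbk
        · rw [hall x hx]; exact hbk
      have h1 : pvH k 0 (b :: rest) = pvH k 0 d := by
        conv_lhs => rw [show b :: rest = (b :: t) ++ d by simp [← hsplit]]
        rw [pvH_skip k d (b :: t) (by simp) hne 0 le_rfl]
        have := pvH_ge k d 0
        omega
      have h3 : pvMaxKey k (pvRuns (b :: rest)) = pvMaxKey k (pvRuns d) := by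
        rw [hruns]
        simp only [pvMaxKey, List.filter_cons]
        have hb : ((b, 1 + (t.length : Int)).1 == k) = false := by simp [hbk]
        rw [hb]
        simp
      rw [h1, h3, ihd]

theorem pvFold_step (bs : List Bool) :
    ∀ (ma ca mu cu : Int), 0 ≤ ca → ca ≤ ma → 0 ≤ cu → cu ≤ mu →
      (bs.foldl pvStep (ma, ca, mu, cu)).1 = max ma (pvH true ca bs) ∧
      (bs.foldl pvStep (ma, ca, mu, cu)).2.2.1 = max mu (pvH false cu bs) := by
  induction bs with
  | nil =>
    intro ma ca mu cu h1 h2 h3 h4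
    simp only [List.foldl_nil, pvH]
    constructor <;> omega
  | cons b bs ih =>
    intro ma ca mu cu h1 h2 h3 h4
    cases b
    · -- b = false
      have hstep : pvStep (ma, ca, mu, cu) false
          = (ma, 0, if cu + 1 > mu then cu + 1 else mu, cu + 1) := by
        simp [pvStep]
      simp only [List.foldl_cons, hstep]
      obtain ⟨ha, hu⟩ := ih ma 0 (if cu + 1 > mu then cu + 1 else mu) (cu + 1)
        le_rfl (by omega) (by omega) (by split <;> omega)
      constructor
      · rw [ha, pvH_cons_eq, if_neg (by simp : ¬(false = true))]
        have := pvH_ge true bs 0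
        omega
      · rw [hu, pvH_cons_eq, if_pos rfl]
        have := pvH_ge false bs (cu + 1)
        split <;> omega
    · -- b = true
      have hstep : pvStep (ma, ca, mu, cu) true
          = (if ca + 1 > ma then ca + 1 else ma, ca + 1, mu, 0) := by
        simp [pvStep]
      simp only [List.foldl_cons, hstep]
      obtain ⟨ha, hu⟩ := ih (if ca + 1 > ma then ca + 1 else ma) (ca + 1) mu 0
        (by omega) (by split <;> omega) le_rfl (by omega)
      constructor
      · rw [ha, pvH_cons_eq, if_pos rfl]
        have := pvH_ge true bs (ca + 1)
        split <;> omega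
      · rw [hu, pvH_cons_eq, if_neg (by simp : ¬(true = false))]
        have := pvH_ge false bs 0
        omega

-- ===== VERDICT (by name: the statement is the Claim_ definition above) =====
theorem calcular_maior_sequencia_spec : Claim_equal_calcular_maior_sequencia := by
  intro resultados categoria _
  unfold Spec_calcular_maior_sequencia
  have hA : calcular_maior_sequencia resultados categoria
      = (((resultados.map (fun r => categoria.contains r)).foldl pvStep (0, 0, 0, 0)).1,
         ((resultados.map (fun r => categoria.contains r)).foldl pvStep (0, 0, 0, 0)).2.2.1) := by
    unfold calcular_maior_sequencia
    rw [List.foldl_map]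
    rfl
  have hB : calcular_maior_sequencia_alt resultados categoria
      = (pvMaxKey true (pvRuns (resultados.map (fun r => categoria.contains r))),
         pvMaxKey false (pvRuns (resultados.map (fun r => categoria.contains r)))) := rfl
  set bs := resultados.map (fun r => categoria.contains r) with hbs
  obtain ⟨ha, hu⟩ := pvFold_step bs 0 0 0 0 le_rfl le_rfl le_rfl le_rfl
  have h1 := pvH_eq_maxKey true bs
  have h2 := pvH_eq_maxKey false bs
  have hge1 := pvH_ge true bs 0
  have hge2 := pvH_ge false bs 0
  rw [hA, hB]
  refine Prod.ext ?_ ?_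
  · simp only
    rw [ha, ← h1]
    omega
  · simp only
    rw [hu, ← h2]
    omega
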